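-- pv_equiv track=rewrite | github.com/Tharun-Varshan-S/PHOTOS_ORGANIZER | main.py | find_duplicate_photos
-- ===== SOURCE A (Python) =====
-- from typing import Dict, List, Optional, Tuple
--
-- def find_duplicate_photos(photos: List[Dict]) -> List[List[Dict]]:
--     """Find duplicate photos based on hash values"""
--     hash_groups = {}
--
--     for photo in photos:
--         hash_value = photo.get('hash_value')
--         if hash_value:
--             if hash_value not in hash_groups:
--                 hash_groups[hash_value] = []
--             hash_groups[hash_value].append(photo)
--
--     # Return groups with more than one photo (duplicates)
--     duplicates = [group for group in hash_groups.values() if len(group) > 1]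
--     return duplicates
-- ===== SOURCE B (Python) =====
-- from typing import Dict, List
--
-- def find_duplicate_photos(photos: List[Dict]) -> List[List[Dict]]:
--     """Find duplicate photos based on hash values (two-pass: count, then collect)."""
--     counts = {}
--     for photo in photos:
--         hash_value = photo.get('hash_value')
--         if hash_value:
--             counts[hash_value] = counts.get(hash_value, 0) + 1
--
--     result = {}
--     for photo in photos:
--         hash_value = photo.get('hash_value')
--         if hash_value and counts[hash_value] > 1:
--             result.setdefault(hash_value, []).append(photo)
--
--     return list(result.values())
-- ===== Notes on version B (the rewrite author's own statement) =====
-- stated objective: alternative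
-- what changed: A does one grouping pass building a hash->group dict of every photo and then filters the groups by size; B never builds non-duplicate groups: a counting pass over the hashes first, then a collection pass that only appends photos whose hash count exceeds 1.
import Mathlib
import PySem

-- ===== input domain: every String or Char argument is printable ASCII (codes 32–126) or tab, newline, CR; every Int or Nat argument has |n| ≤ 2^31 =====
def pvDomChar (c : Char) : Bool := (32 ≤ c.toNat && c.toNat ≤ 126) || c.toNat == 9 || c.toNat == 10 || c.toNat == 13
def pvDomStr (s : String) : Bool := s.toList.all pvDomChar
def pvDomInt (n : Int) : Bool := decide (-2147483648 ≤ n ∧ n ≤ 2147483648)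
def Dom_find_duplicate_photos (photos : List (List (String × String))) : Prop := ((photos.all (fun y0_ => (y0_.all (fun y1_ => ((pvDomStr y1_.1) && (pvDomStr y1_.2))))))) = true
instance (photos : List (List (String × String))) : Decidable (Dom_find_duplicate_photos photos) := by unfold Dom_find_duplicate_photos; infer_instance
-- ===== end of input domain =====

-- B replaces A's group-everything-then-filter pass by a counting pass plus a collection pass
-- that only ever stores duplicate groups (objective: alternative decomposition, same asymptotic cost).

-- photo.get('hash_value') on the association-list encoding of a Python dict (first match)
def pyGetStr (d : List (String × String)) (k : String) : Option String :=
  (d.find? (fun p => p.1 == k)).map (·.2)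

-- ===== PORT A =====
def find_duplicate_photos (photos : List (List (String × String))) : List (List (List (String × String))) :=
  let hash_groups : PySem.Dict String (List (List (String × String))) :=
    photos.foldl (fun hash_groups photo =>
      match pyGetStr photo "hash_value" with
      | none => hash_groups                     -- `if hash_value:` is false for None
      | some hash_value =>
        if hash_value ≠ "" then                 -- `if hash_value:` for a string
          let hash_groups :=
            if hash_groups.contains hash_value then hash_groups
            else hash_groups.insert hash_value []      -- `if hash_value not in hash_groups: … = []`
          hash_groups.modify hash_value [] (fun g => g ++ [photo])   -- `hash_groups[hash_value].append(photo)`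
        else hash_groups)
      PySem.Dict.empty
  hash_groups.values.filter (fun group => group.length > 1)

-- ===== PORT B =====
def find_duplicate_photos_alt (photos : List (List (String × String))) : List (List (List (String × String))) :=
  let counts : PySem.Dict String Int :=
    photos.foldl (fun counts photo =>
      match pyGetStr photo "hash_value" with
      | none => counts
      | some hash_value =>
        if hash_value ≠ "" then
          counts.modify hash_value 0 (fun c => c + 1)   -- `counts[h] = counts.get(h, 0) + 1`
        else counts)
      PySem.Dict.empty
  let result : PySem.Dict String (List (List (String × String))) :=
    photos.foldl (fun result photo =>
      match pyGetStr photo "hash_value" with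
      | none => result
      | some hash_value =>
        if hash_value ≠ "" then                          -- `hash_value and …` short-circuits
          if counts.getD hash_value 0 > 1 then
            result.modify hash_value [] (fun g => g ++ [photo])   -- `result.setdefault(h, []).append(photo)`
          else result
        else result)
      PySem.Dict.empty
  result.values

-- ===== PRECONDITION & SPEC =====
def Spec_find_duplicate_photos (photos : List (List (String × String))) (out : List (List (List (String × String)))) : Prop := out = find_duplicate_photos_alt photos
instance (photos : List (List (String × String))) (out : List (List (List (String × String)))) : Decidable (Spec_find_duplicate_photos photos out) := by unfold Spec_find_duplicate_photos; infer_instance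

-- ===== CLAIM (what is proved, stated in full; the proofs are below) =====
def Claim_equal_find_duplicate_photos : Prop := ∀ (photos : List (List (String × String))), Dom_find_duplicate_photos photos → Spec_find_duplicate_photos photos (find_duplicate_photos photos)

-- ===== LEMMAS AND PROOFS =====

-- the photos that pass the truthiness test, tagged with their hash
def keyOf (p : List (String × String)) : Option (String × List (String × String)) :=
  match pyGetStr p "hash_value" with
  | none => none
  | some h => if h ≠ "" then some (h, p) else none

def keyed (photos : List (List (String × String))) : List (String × List (String × String)) :=
  photos.filterMap keyOf

def hsOf (photos : List (List (String × String))) : List String :=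
  (keyed photos).map (·.1)

-- any truthiness-guarded fold over photos is a fold over `keyed photos`
theorem foldl_keyed {δ : Type} (f : δ → String → List (String × String) → δ)
    (l : List (List (String × String))) (init : δ) :
    l.foldl (fun d photo =>
      match pyGetStr photo "hash_value" with
      | none => d
      | some h => if h ≠ "" then f d h photo else d) init
    = (keyed l).foldl (fun d q => f d q.1 q.2) init := by
  induction l generalizing init with
  | nil => rfl
  | cons p l ih =>
    simp only [List.foldl_cons]
    rw [ih]
    cases hg : pyGetStr p "hash_value" with
    | none => simp [keyed, keyOf, hg]
    | some h =>
      by_cases hh : h = ""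
      · simp [keyed, keyOf, hg, hh]
      · simp [keyed, keyOf, hg, hh]

theorem foldl_fun_congr {α δ : Type} (f g : δ → α → δ) (l : List α) (init : δ)
    (h : ∀ d x, f d x = g d x) : l.foldl f init = l.foldl g init := by
  induction l generalizing init with
  | nil => rfl
  | cons x l ih => simp only [List.foldl_cons, h]; exact ih _

-- A's `if h not in d: d[h] = []` followed by the append is one modify
theorem ensure_modify {κ ν : Type} [BEq κ] [LawfulBEq κ] (d : PySem.Dict κ (List ν)) (k : κ)
    (f : List ν → List ν) :
    (if d.contains k then d else d.insert k []).modify k [] f = d.modify k [] f := by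
  by_cases h : d.contains k = true
  · simp [h]
  · have h' : d.contains k = false := by simpa using h
    simp [h', PySem.Dict.modify, PySem.Dict.getD_insert_self, PySem.Dict.insert_insert_self,
      PySem.Dict.getD_of_not_contains d [] h']

-- dedup commutes with a filter
theorem ofList_filter {α : Type} [BEq α] [LawfulBEq α] (p : α → Bool) (xs : List α) :
    PySem.Set.ofList (xs.filter p) = (PySem.Set.ofList xs).filter p := by
  induction xs using List.reverseRecOn with
  | nil => rfl
  | append_singleton xs x ih =>
    rw [List.filter_append, PySem.Set.ofList_append_singleton]
    by_cases hx : p x = true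
    · have h1 : List.filter p [x] = [x] := by simp [hx]
      rw [h1, PySem.Set.ofList_append_singleton, ih, PySem.Set.add_eq_ite, PySem.Set.add_eq_ite]
      by_cases hmem : x ∈ PySem.Set.ofList xs
      · have hmf : x ∈ (PySem.Set.ofList xs).filter p := List.mem_filter.mpr ⟨hmem, hx⟩
        simp [hmem, hmf]
      · have hmf : x ∉ (PySem.Set.ofList xs).filter p := fun hc => hmem (List.mem_filter.mp hc).1
        simp [hmem, hmf, List.filter_append, hx]
    · have h1 : List.filter p [x] = [] := by simp [hx]
      rw [h1, List.append_nil, ih, PySem.Set.add_eq_ite]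
      by_cases hmem : x ∈ PySem.Set.ofList xs
      · simp [hmem]
      · simp [hmem, List.filter_append, hx]

-- per-key group length = multiplicity of the key
theorem length_filter_keyed (photos : List (List (String × String))) (k : String) :
    ((keyed photos).filter (fun q => q.1 == k)).length = (hsOf photos).count k := by
  unfold hsOf
  rw [List.count_eq_countP, List.countP_map, ← List.countP_eq_length_filter]
  rfl

theorem map_fst_filter (photos : List (List (String × String))) :
    ((keyed photos).filter (fun q => decide (1 < (hsOf photos).count q.1))).map Prod.fst
      = ((keyed photos).map Prod.fst).filter (fun k => decide (1 < (hsOf photos).count k)) := by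
  rw [List.filter_map]
  rfl

-- the canonical form both ports reduce to
def canonical (photos : List (List (String × String))) : List (List (List (String × String))) :=
  ((PySem.Set.ofList (hsOf photos)).filter (fun k => decide (1 < (hsOf photos).count k))).map
    (fun k => ((keyed photos).filter (fun q => q.1 == k)).map (·.2))

theorem A_eq_canonical (photos : List (List (String × String))) :
    find_duplicate_photos photos = canonical photos := by
  simp only [find_duplicate_photos]
  unfold canonical
  rw [foldl_keyed (f := fun (d : PySem.Dict String (List (List (String × String)))) h photo =>
    (if d.contains h then d else d.insert h []).modify h [] (fun g => g ++ [photo]))]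
  rw [foldl_fun_congr _ _ _ _
    (fun (d : PySem.Dict String (List (List (String × String))))
        (q : String × List (String × String)) => ensure_modify d q.1 (fun g => g ++ [q.2]))]
  rw [PySem.Dict.values_eq_map_keys _
    (PySem.Dict.nodup_keys_foldl_modify_key _ _ _ _ _ PySem.Dict.nodup_keys_empty) []]
  rw [PySem.Dict.keys_foldl_modify_key, PySem.Dict.keys_empty, PySem.Set.update_nil_left]
  rw [show ((keyed photos).map fun q => q.1) = hsOf photos from rfl]
  rw [List.filter_map]
  refine congrArg₂ List.map ?_ ?_
  · funext k
    rw [PySem.Dict.getD_foldl_modify_append, PySem.Dict.getD_empty, List.nil_append]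
  · apply List.filter_congr
    intro k _
    simp only [Function.comp_apply]
    rw [PySem.Dict.getD_foldl_modify_append, PySem.Dict.getD_empty]
    simp only [List.nil_append, List.length_map]
    rw [length_filter_keyed]

theorem B_eq_canonical (photos : List (List (String × String))) :
    find_duplicate_photos_alt photos = canonical photos := by
  simp only [find_duplicate_photos_alt]
  unfold canonical
  rw [foldl_keyed (f := fun (d : PySem.Dict String Int) h _photo => d.modify h 0 (fun c => c + 1))]
  rw [foldl_keyed (f := fun (d : PySem.Dict String (List (List (String × String)))) h photo =>
    if ((keyed photos).foldl (fun (d : PySem.Dict String Int) q => d.modify q.1 0 fun c => c + 1)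
        PySem.Dict.empty).getD h 0 > 1
    then d.modify h [] (fun g => g ++ [photo]) else d)]
  have hcount : ∀ k : String,
      ((keyed photos).foldl (fun (d : PySem.Dict String Int) q => d.modify q.1 0 fun c => c + 1)
        PySem.Dict.empty).getD k 0 = ((hsOf photos).count k : Int) := by
    intro k
    have h := PySem.Dict.getD_foldl_modify_add_one ((keyed photos).map (fun q => q.1))
      (PySem.Dict.empty) k
    rw [List.foldl_map] at h
    simpa [hsOf, PySem.Dict.getD_empty] using h
  rw [PySem.List.foldl_ite_eq_foldl_filter]
  have hfilt : (keyed photos).filter (fun q => decide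
      (((keyed photos).foldl (fun (d : PySem.Dict String Int) q => d.modify q.1 0 fun c => c + 1)
        PySem.Dict.empty).getD q.1 0 > 1))
      = (keyed photos).filter (fun q => decide (1 < (hsOf photos).count q.1)) := by
    apply List.filter_congr
    intro q _
    rw [hcount q.1]
    simp [Nat.one_lt_cast]
  rw [hfilt]
  rw [PySem.Dict.values_eq_map_keys _
    (PySem.Dict.nodup_keys_foldl_modify_key _ _ _ _ _ PySem.Dict.nodup_keys_empty) []]
  rw [PySem.Dict.keys_foldl_modify_key, PySem.Dict.keys_empty, PySem.Set.update_nil_left]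
  rw [map_fst_filter photos]
  rw [show (keyed photos).map Prod.fst = hsOf photos from rfl]
  rw [ofList_filter]
  apply List.map_congr_left
  intro k hk
  have hpk : 1 < (hsOf photos).count k := by
    have := (List.mem_filter.mp hk).2
    simpa using this
  rw [PySem.Dict.getD_foldl_modify_append, PySem.Dict.getD_empty, List.nil_append]
  congr 1
  rw [List.filter_filter]
  apply List.filter_congr
  intro q _
  by_cases hq : q.1 = k
  · simp [hq, hpk]
  · simp [hq]

-- ===== VERDICT (by name: the statement is the Claim_ definition above) =====
theorem find_duplicate_photos_spec : Claim_equal_find_duplicate_photos := by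
  intro photos _
  unfold Spec_find_duplicate_photos
  rw [A_eq_canonical, B_eq_canonical]
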